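-- pv_equiv track=rewrite | github.com/KomodoPlatform/komodo-docs-mdx | utils/py/data/coins_config_loader.py | _get_preferred_rpc_nodes
-- ===== SOURCE A (Python) =====
-- from typing import Dict, List, Optional, Any
--
-- def _get_preferred_rpc_nodes(nodes: Optional[List[Dict[str, Any]]], protocol_type: str) -> List[Dict[str, Any]]:
--     """Get preferred RPC nodes with cipig/komodo preference and SSL/WSS over TCP."""
--     if not nodes:
--         # Fallback to default servers
--         if protocol_type == "Ethereum":
--             return [
--                 {"url": "https://eth3.cipig.net:18555"},
--                 {"url": "https://node.komodo.earth:8080/ethereum"},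
--                 {"url": "https://eth.drpc.org"}
--             ]
--         else:
--             return [{"url": "https://node.komodo.earth:8080"}]
--
--     # Sort nodes by preference: cipig/komodo first, SSL/WSS over TCP
--     preferred_nodes = []
--     other_nodes = []
--
--     for node in nodes:
--         url = node.get("url", "")
--         ws_url = node.get("ws_url", "")
--
--         # Check if it's a preferred domain
--         is_preferred = any(domain in url.lower() for domain in ["cipig", "komodo"])
--
--         # Prefer HTTPS/WSS over HTTP/TCP
--         is_secure = url.startswith("https://") or url.startswith("wss://")
--
--         node_entry = {"url": url}
--
--         # Add WebSocket URL if available and secure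
--         if ws_url and ws_url.startswith("wss://"):
--             node_entry["ws_url"] = ws_url
--
--         if is_preferred:
--             preferred_nodes.append((node_entry, is_secure))
--         else:
--             other_nodes.append((node_entry, is_secure))
--
--     # Sort by security (secure first)
--     preferred_nodes.sort(key=lambda x: x[1], reverse=True)
--     other_nodes.sort(key=lambda x: x[1], reverse=True)
--
--     # Combine and take up to 3 nodes
--     final_nodes = []
--
--     # Add preferred nodes first
--     for node_entry, _ in preferred_nodes:
--         if len(final_nodes) < 3:
--             final_nodes.append(node_entry)
--
--     # Add other nodes if we need more
--     for node_entry, _ in other_nodes: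
--         if len(final_nodes) < 3:
--             final_nodes.append(node_entry)
--
--     # Ensure we have at least one node
--     if not final_nodes and nodes:
--         final_nodes = [{"url": nodes[0].get("url", "")}]
--
--     return final_nodes
-- ===== SOURCE B (Python) =====
-- def _get_preferred_rpc_nodes(nodes, protocol_type):
--     """Pick up to 3 nodes: preferred-domain first, secure first, original order kept."""
--     if not nodes:
--         if protocol_type == "Ethereum":
--             return [
--                 {"url": "https://eth3.cipig.net:18555"},
--                 {"url": "https://node.komodo.earth:8080/ethereum"},
--                 {"url": "https://eth.drpc.org"}
--             ]
--         return [{"url": "https://node.komodo.earth:8080"}]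
--
--     # Four buckets in one pass; no sorting needed since the key is boolean.
--     pref_secure, pref_plain, other_secure, other_plain = [], [], [], []
--     for node in nodes:
--         url = node.get("url", "")
--         ws_url = node.get("ws_url", "")
--         entry = {"url": url}
--         if ws_url and ws_url.startswith("wss://"):
--             entry["ws_url"] = ws_url
--         preferred = "cipig" in url.lower() or "komodo" in url.lower()
--         secure = url.startswith("https://") or url.startswith("wss://")
--         if preferred:
--             (pref_secure if secure else pref_plain).append(entry)
--         else:
--             (other_secure if secure else other_plain).append(entry)
--     return (pref_secure + pref_plain + other_secure + other_plain)[:3]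
-- ===== Notes on version B (the rewrite author's own statement) =====
-- stated objective: simpler
-- what changed: B replaces A's two (entry,is_secure)-pair lists, two stable reverse=True sorts and two length-guarded append loops by a single pass that drops each node entry into one of four order-preserving buckets (preferred-secure, preferred-plain, other-secure, other-plain) and then takes the first 3 of their concatenation; no sort and no pair bookkeeping are needed because the sort key is boolean and the sort is stable.
import Mathlib
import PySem

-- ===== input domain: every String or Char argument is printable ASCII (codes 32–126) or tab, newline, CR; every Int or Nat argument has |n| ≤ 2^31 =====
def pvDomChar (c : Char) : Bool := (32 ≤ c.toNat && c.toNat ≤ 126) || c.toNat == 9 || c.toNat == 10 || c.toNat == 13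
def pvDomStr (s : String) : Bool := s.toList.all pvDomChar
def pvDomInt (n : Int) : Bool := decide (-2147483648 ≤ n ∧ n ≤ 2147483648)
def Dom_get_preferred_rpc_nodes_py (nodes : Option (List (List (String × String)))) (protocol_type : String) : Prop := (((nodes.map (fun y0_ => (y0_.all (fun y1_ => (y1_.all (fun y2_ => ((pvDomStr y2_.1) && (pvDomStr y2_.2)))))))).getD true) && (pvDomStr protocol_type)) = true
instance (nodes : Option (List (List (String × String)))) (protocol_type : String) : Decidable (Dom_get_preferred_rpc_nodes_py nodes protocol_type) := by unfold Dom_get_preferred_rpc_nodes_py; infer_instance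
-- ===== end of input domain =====

-- B replaces A's two reverse=True sorts + length-guarded append loops by a single pass into
-- four order-preserving buckets followed by take 3 (objective: simpler).


-- ===== PORT A =====
-- default servers returned when 'not nodes'
def pvDefaultsA (protocol_type : String) : List (List (String × String)) :=
  if protocol_type = "Ethereum" then
    [[("url", "https://eth3.cipig.net:18555")],
     [("url", "https://node.komodo.earth:8080/ethereum")],
     [("url", "https://eth.drpc.org")]]
  else
    [[("url", "https://node.komodo.earth:8080")]]

def get_preferred_rpc_nodes_py (nodes : Option (List (List (String × String)))) (protocol_type : String) : List (List (String × String)) :=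
  match nodes with
  | none => pvDefaultsA protocol_type
  | some ns =>
    if ns = [] then pvDefaultsA protocol_type
    else
      -- build preferred_nodes / other_nodes (lists of (node_entry, is_secure))
      let st := ns.foldl (fun (st : List ((List (String × String)) × Bool) × List ((List (String × String)) × Bool)) node =>
        let url := PySem.Dict.getD ⟨node⟩ "url" ""
        let ws_url := PySem.Dict.getD ⟨node⟩ "ws_url" ""
        let is_preferred := ["cipig", "komodo"].any (fun domain => PySem.Str.isIn domain (PySem.Str.lower url))
        let is_secure := PySem.Str.startswith url "https://" || PySem.Str.startswith url "wss://"
        let node_entry := if ws_url ≠ "" ∧ PySem.Str.startswith ws_url "wss://" then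
            [("url", url), ("ws_url", ws_url)] else [("url", url)]
        if is_preferred then (st.1 ++ [(node_entry, is_secure)], st.2)
        else (st.1, st.2 ++ [(node_entry, is_secure)])) ([], [])
      -- sort both by security, secure first (reverse=True, stable)
      let preferred_nodes := PySem.List.sorted st.1 (fun x => x.2) true
      let other_nodes := PySem.List.sorted st.2 (fun x => x.2) true
      -- append while len(final_nodes) < 3
      let f1 := preferred_nodes.foldl (fun acc x => if acc.length < 3 then acc ++ [x.1] else acc) []
      let f2 := other_nodes.foldl (fun acc x => if acc.length < 3 then acc ++ [x.1] else acc) f1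
      if f2 = [] ∧ ns ≠ [] then [[("url", PySem.Dict.getD ⟨ns.headD []⟩ "url" "")]] else f2

-- ===== PORT B =====
def pvDefaultsB (protocol_type : String) : List (List (String × String)) :=
  if protocol_type = "Ethereum" then
    [[("url", "https://eth3.cipig.net:18555")],
     [("url", "https://node.komodo.earth:8080/ethereum")],
     [("url", "https://eth.drpc.org")]]
  else
    [[("url", "https://node.komodo.earth:8080")]]

def get_preferred_rpc_nodes_py_alt (nodes : Option (List (List (String × String)))) (protocol_type : String) : List (List (String × String)) :=
  match nodes with
  | none => pvDefaultsB protocol_type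
  | some ns =>
    if ns = [] then pvDefaultsB protocol_type
    else
      -- one pass into four order-preserving buckets
      let bk := ns.foldl (fun (bk : List (List (String × String)) × List (List (String × String)) × List (List (String × String)) × List (List (String × String))) node =>
        let url := PySem.Dict.getD ⟨node⟩ "url" ""
        let ws_url := PySem.Dict.getD ⟨node⟩ "ws_url" ""
        let entry := if ws_url ≠ "" ∧ PySem.Str.startswith ws_url "wss://" then
            [("url", url), ("ws_url", ws_url)] else [("url", url)]
        let preferred := PySem.Str.isIn "cipig" (PySem.Str.lower url) || PySem.Str.isIn "komodo" (PySem.Str.lower url)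
        let secure := PySem.Str.startswith url "https://" || PySem.Str.startswith url "wss://"
        if preferred then
          if secure then (bk.1 ++ [entry], bk.2.1, bk.2.2.1, bk.2.2.2)
          else (bk.1, bk.2.1 ++ [entry], bk.2.2.1, bk.2.2.2)
        else
          if secure then (bk.1, bk.2.1, bk.2.2.1 ++ [entry], bk.2.2.2)
          else (bk.1, bk.2.1, bk.2.2.1, bk.2.2.2 ++ [entry])) ([], [], [], [])
      (bk.1 ++ bk.2.1 ++ bk.2.2.1 ++ bk.2.2.2).take 3

-- ===== PRECONDITION & SPEC =====
def Spec_get_preferred_rpc_nodes_py (nodes : Option (List (List (String × String)))) (protocol_type : String) (out : List (List (String × String))) : Prop := out = get_preferred_rpc_nodes_py_alt nodes protocol_type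
instance (nodes : Option (List (List (String × String)))) (protocol_type : String) (out : List (List (String × String))) : Decidable (Spec_get_preferred_rpc_nodes_py nodes protocol_type out) := by unfold Spec_get_preferred_rpc_nodes_py; infer_instance

-- ===== CLAIM (what is proved, stated in full; the proofs are below) =====
def Claim_equal_get_preferred_rpc_nodes_py : Prop := ∀ (nodes : Option (List (List (String × String)))) (protocol_type : String), Dom_get_preferred_rpc_nodes_py nodes protocol_type → Spec_get_preferred_rpc_nodes_py nodes protocol_type (get_preferred_rpc_nodes_py nodes protocol_type)

-- ===== LEMMAS AND PROOFS =====
-- abbreviations for the per-node values both programs compute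
def pvE (node : List (String × String)) : List (String × String) :=
  let url := PySem.Dict.getD ⟨node⟩ "url" ""
  let ws_url := PySem.Dict.getD ⟨node⟩ "ws_url" ""
  if ws_url ≠ "" ∧ PySem.Str.startswith ws_url "wss://" then
    [("url", url), ("ws_url", ws_url)] else [("url", url)]
def pvP (node : List (String × String)) : Bool :=
  PySem.Str.isIn "cipig" (PySem.Str.lower (PySem.Dict.getD ⟨node⟩ "url" "")) ||
  PySem.Str.isIn "komodo" (PySem.Str.lower (PySem.Dict.getD ⟨node⟩ "url" ""))
def pvS (node : List (String × String)) : Bool :=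
  PySem.Str.startswith (PySem.Dict.getD ⟨node⟩ "url" "") "https://" ||
  PySem.Str.startswith (PySem.Dict.getD ⟨node⟩ "url" "") "wss://"

-- canonical forms of the two loop bodies
def pvStepA (st : List ((List (String × String)) × Bool) × List ((List (String × String)) × Bool))
    (node : List (String × String)) :
    List ((List (String × String)) × Bool) × List ((List (String × String)) × Bool) :=
  if pvP node then (st.1 ++ [(pvE node, pvS node)], st.2) else (st.1, st.2 ++ [(pvE node, pvS node)])

def pvStepB (bk : List (List (String × String)) × List (List (String × String)) × List (List (String × String)) × List (List (String × String)))
    (node : List (String × String)) :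
    List (List (String × String)) × List (List (String × String)) × List (List (String × String)) × List (List (String × String)) :=
  if pvP node then
    if pvS node then (bk.1 ++ [pvE node], bk.2.1, bk.2.2.1, bk.2.2.2)
    else (bk.1, bk.2.1 ++ [pvE node], bk.2.2.1, bk.2.2.2)
  else
    if pvS node then (bk.1, bk.2.1, bk.2.2.1 ++ [pvE node], bk.2.2.2)
    else (bk.1, bk.2.1, bk.2.2.1, bk.2.2.2 ++ [pvE node])

theorem pvbodyA_eq :
    (fun (st : List ((List (String × String)) × Bool) × List ((List (String × String)) × Bool)) node =>
        let url := PySem.Dict.getD ⟨node⟩ "url" ""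
        let ws_url := PySem.Dict.getD ⟨node⟩ "ws_url" ""
        let is_preferred := ["cipig", "komodo"].any (fun domain => PySem.Str.isIn domain (PySem.Str.lower url))
        let is_secure := PySem.Str.startswith url "https://" || PySem.Str.startswith url "wss://"
        let node_entry := if ws_url ≠ "" ∧ PySem.Str.startswith ws_url "wss://" then
            [("url", url), ("ws_url", ws_url)] else [("url", url)]
        if is_preferred then (st.1 ++ [(node_entry, is_secure)], st.2)
        else (st.1, st.2 ++ [(node_entry, is_secure)])) = pvStepA := by
  funext st node
  simp [pvStepA, pvP, pvE, pvS]

theorem pvbodyB_eq :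
    (fun (bk : List (List (String × String)) × List (List (String × String)) × List (List (String × String)) × List (List (String × String))) node =>
        let url := PySem.Dict.getD ⟨node⟩ "url" ""
        let ws_url := PySem.Dict.getD ⟨node⟩ "ws_url" ""
        let entry := if ws_url ≠ "" ∧ PySem.Str.startswith ws_url "wss://" then
            [("url", url), ("ws_url", ws_url)] else [("url", url)]
        let preferred := PySem.Str.isIn "cipig" (PySem.Str.lower url) || PySem.Str.isIn "komodo" (PySem.Str.lower url)
        let secure := PySem.Str.startswith url "https://" || PySem.Str.startswith url "wss://"
        if preferred then
          if secure then (bk.1 ++ [entry], bk.2.1, bk.2.2.1, bk.2.2.2)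
          else (bk.1, bk.2.1 ++ [entry], bk.2.2.1, bk.2.2.2)
        else
          if secure then (bk.1, bk.2.1, bk.2.2.1 ++ [entry], bk.2.2.2)
          else (bk.1, bk.2.1, bk.2.2.1, bk.2.2.2 ++ [entry])) = pvStepB := by
  funext bk node
  simp [pvStepB, pvP, pvE, pvS]

theorem pvA_split (ns : List (List (String × String))) (p o : List ((List (String × String)) × Bool)) :
    ns.foldl pvStepA (p, o)
    = (p ++ (ns.filter pvP).map (fun n => (pvE n, pvS n)),
       o ++ (ns.filter (fun n => !pvP n)).map (fun n => (pvE n, pvS n))) := by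
  induction ns generalizing p o with
  | nil => simp
  | cons x t ih =>
    by_cases h : pvP x = true <;>
      simp [pvStepA, h, ih]

theorem pvB_split (ns : List (List (String × String)))
    (a b c d : List (List (String × String))) :
    ns.foldl pvStepB (a, b, c, d)
    = (a ++ (ns.filter (fun n => pvP n && pvS n)).map pvE,
       b ++ (ns.filter (fun n => pvP n && !pvS n)).map pvE,
       c ++ (ns.filter (fun n => !pvP n && pvS n)).map pvE,
       d ++ (ns.filter (fun n => !pvP n && !pvS n)).map pvE) := by
  induction ns generalizing a b c d with
  | nil => simp
  | cons x t ih =>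
    by_cases hp : pvP x = true <;> by_cases hs : pvS x = true <;>
      simp [pvStepB, hp, hs, ih]

theorem pvIns_false {α : Type} (x : α × Bool) (hx : x.2 = false) (l : List (α × Bool)) :
    PySem.List.insertBy (fun a b : α × Bool => decide (b.2 < a.2)) x l = l ++ [x] := by
  induction l with
  | nil => rfl
  | cons y t ih => simp [PySem.List.insertBy, hx, ih]

theorem pvIns_true {α : Type} (x : α × Bool) (hx : x.2 = true)
    (ts fs : List (α × Bool)) (ht : ∀ a ∈ ts, a.2 = true) (hf : ∀ a ∈ fs, a.2 = false) :
    PySem.List.insertBy (fun a b : α × Bool => decide (b.2 < a.2)) x (ts ++ fs) = ts ++ x :: fs := by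
  induction ts with
  | nil =>
    cases fs with
    | nil => rfl
    | cons y t =>
      have hy : y.2 = false := hf y (by simp)
      simp [PySem.List.insertBy, hx, hy]
  | cons y t ih =>
    have hy : y.2 = true := ht y (by simp)
    simp [PySem.List.insertBy, hx, hy]
    exact ih (fun a ha => ht a (by simp [ha]))

theorem pvSortedBool {α : Type} (l ts fs : List (α × Bool))
    (ht : ∀ a ∈ ts, a.2 = true) (hf : ∀ a ∈ fs, a.2 = false) :
    l.foldl (fun acc x => PySem.List.insertBy (fun a b : α × Bool => decide (b.2 < a.2)) x acc) (ts ++ fs)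
      = (ts ++ l.filter (fun x => x.2)) ++ (fs ++ l.filter (fun x => !x.2)) := by
  induction l generalizing ts fs with
  | nil => simp
  | cons x t ih =>
    by_cases hx : x.2 = true
    · rw [List.foldl_cons, pvIns_true x hx ts fs ht hf]
      have ht' : ∀ a ∈ ts ++ [x], a.2 = true := by
        intro a ha
        rw [List.mem_append] at ha
        rcases ha with h | h
        · exact ht a h
        · simp at h; subst h; exact hx
      have := ih (ts ++ [x]) fs ht' hf
      simpa [hx] using this
    · rw [List.foldl_cons,
        show PySem.List.insertBy (fun a b : α × Bool => decide (b.2 < a.2)) x (ts ++ fs) = (ts ++ fs) ++ [x] from pvIns_false x (by simpa using hx) _]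
      have hf' : ∀ a ∈ fs ++ [x], a.2 = false := by
        intro a ha
        rw [List.mem_append] at ha
        rcases ha with h | h
        · exact hf a h
        · simp at h; subst h; simpa using hx
      have := ih ts (fs ++ [x]) ht hf'
      rw [List.append_assoc] at this
      simpa [hx] using this

theorem pvSorted_eq {α : Type} (l : List (α × Bool)) :
    PySem.List.sorted l (fun x => x.2) true = l.filter (fun x => x.2) ++ l.filter (fun x => !x.2) := by
  rw [PySem.List.sorted_rev_eq_foldl_insertBy]
  simpa using pvSortedBool l [] [] (by simp) (by simp)

theorem pvTakeLoop {α β : Type} (l : List (α × β)) (acc : List α) :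
    l.foldl (fun acc x => if acc.length < 3 then acc ++ [x.1] else acc) acc
      = acc ++ (l.map (fun x => x.1)).take (3 - acc.length) := by
  induction l generalizing acc with
  | nil => simp
  | cons x t ih =>
    by_cases h : acc.length < 3
    · rw [List.foldl_cons, if_pos h, ih]
      have h3 : 3 - acc.length = (3 - (acc ++ [x.1]).length) + 1 := by simp; omega
      simp [h3]
    · rw [List.foldl_cons, if_neg h, ih]
      have h0 : 3 - acc.length = 0 := by omega
      simp [h0]

theorem pvFilterMapT (l : List (List (String × String))) :
    List.filter (fun x => x.2) (List.map (fun n => (pvE n, pvS n)) l)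
      = List.map (fun n => (pvE n, pvS n)) (List.filter pvS l) := by
  rw [List.filter_map]; rfl

theorem pvFilterMapF (l : List (List (String × String))) :
    List.filter (fun x => !x.2) (List.map (fun n => (pvE n, pvS n)) l)
      = List.map (fun n => (pvE n, pvS n)) (List.filter (fun n => !pvS n) l) := by
  rw [List.filter_map]; rfl

theorem pvMapFst (l : List (List (String × String))) :
    List.map (fun x : (List (String × String)) × Bool => x.1) (List.map (fun n => (pvE n, pvS n)) l)
      = List.map pvE l := by
  rw [List.map_map]; rfl

theorem pvFilterComm (p q : List (String × String) → Bool) (l : List (List (String × String))) :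
    List.filter q (List.filter p l) = List.filter (fun n => p n && q n) l := by
  rw [List.filter_filter]
  exact List.filter_congr (fun x _ => by rw [Bool.and_comm])

theorem pvTake3 {α : Type} (a b : List α) :
    a.take 3 ++ b.take (3 - (a.take 3).length) = (a ++ b).take 3 := by
  rw [List.take_append]
  congr 1
  simp [List.length_take]
  omega

theorem pvFourEmpty (ns : List (List (String × String)))
    (h1 : ns.filter (fun n => pvP n && pvS n) = [])
    (h2 : ns.filter (fun n => pvP n && !pvS n) = [])
    (h3 : ns.filter (fun n => !pvP n && pvS n) = [])
    (h4 : ns.filter (fun n => !pvP n && !pvS n) = []) : ns = [] := by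
  cases ns with
  | nil => rfl
  | cons x t =>
    exfalso
    by_cases hp : pvP x = true <;> by_cases hs : pvS x = true
    · simp [hp, hs] at h1
    · simp [hp, hs] at h2
    · simp [hp, hs] at h3
    · simp [hp, hs] at h4

-- ===== VERDICT (by name: the statement is the Claim_ definition above) =====
theorem get_preferred_rpc_nodes_py_spec : Claim_equal_get_preferred_rpc_nodes_py := by
  intro nodes protocol_type _
  unfold Spec_get_preferred_rpc_nodes_py get_preferred_rpc_nodes_py get_preferred_rpc_nodes_py_alt
  cases nodes with
  | none => simp [pvDefaultsA, pvDefaultsB]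
  | some ns =>
    by_cases hns : ns = []
    · simp [hns, pvDefaultsA, pvDefaultsB]
    · simp only [hns, if_false, pvbodyA_eq, pvbodyB_eq, pvA_split, pvB_split, pvSorted_eq,
        pvTakeLoop, List.nil_append, List.map_append, pvFilterMapT, pvFilterMapF, pvMapFst,
        pvFilterComm, List.length_nil, Nat.sub_zero, pvTake3, List.append_assoc]
      rw [if_neg]
      intro ⟨hemp, _⟩
      rw [List.take_eq_nil_iff] at hemp
      rcases hemp with h | h
      · exact absurd h (by decide)
      · simp only [List.append_eq_nil_iff, List.map_eq_nil_iff] at h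
        exact hns (pvFourEmpty ns h.1 h.2.1 h.2.2.1 h.2.2.2)
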